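-- pv_equiv track=rewrite | github.com/whaleymar/nxRETools | ghidra/ImportSymbolsForWSDB.py | splitNamespace
-- ===== SOURCE A (Python) =====
-- def splitNamespace(symbol):
--     namespaces = []
--     bracket_level = 0
--     current = ''
--     i = 0
--     for c in symbol:
--         if c == '<':
--             bracket_level += 1
--             current += c
--         elif c == '>':
--             bracket_level -= 1
--             current += c
--         elif c == ':' and symbol[i] == ':' and bracket_level == 0:
--             if current != '':
--                 namespaces.append(current)
--             current = ''
--         else:
--             current += c
--         i += 1
--     namespaces.append(current)
--     return namespaces
-- ===== SOURCE B (Python) =====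
-- def splitNamespace(symbol):
--     # pass 1: record indices of top-level ':' characters
--     cuts = []
--     level = 0
--     for i, c in enumerate(symbol):
--         if c == '<':
--             level += 1
--         elif c == '>':
--             level -= 1
--         elif c == ':' and level == 0:
--             cuts.append(i)
--     # pass 2: slice the symbol at the recorded cuts
--     segments = []
--     prev = 0
--     for pos in cuts:
--         segments.append(symbol[prev:pos])
--         prev = pos + 1
--     segments.append(symbol[prev:])
--     # drop empty middle segments, always keep the final one
--     return [s for s in segments[:-1] if s != ''] + segments[-1:]
-- ===== Notes on version B (the rewrite author's own statement) =====
-- stated objective: alternative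
-- what changed: Replaced A's single scan that builds each segment by repeated string concatenation with a two-pass decomposition: first collect the indices of top-level colon cuts, then slice the symbol at those cuts, filtering empty middle segments while keeping the final one.
import Mathlib
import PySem

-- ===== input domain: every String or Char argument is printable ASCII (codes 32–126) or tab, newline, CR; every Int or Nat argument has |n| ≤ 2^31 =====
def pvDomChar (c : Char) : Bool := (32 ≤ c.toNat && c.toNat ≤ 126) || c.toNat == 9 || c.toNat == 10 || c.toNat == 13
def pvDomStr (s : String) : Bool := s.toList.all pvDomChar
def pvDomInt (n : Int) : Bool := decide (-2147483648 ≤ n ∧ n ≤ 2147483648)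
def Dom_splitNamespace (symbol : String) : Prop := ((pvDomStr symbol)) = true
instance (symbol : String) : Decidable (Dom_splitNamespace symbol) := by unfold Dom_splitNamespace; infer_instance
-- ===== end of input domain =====

-- B replaces A's single accumulating scan by two passes — collect the top-level colon cut
-- indices, then slice the string at those cuts — an alternative decomposition of the same
-- cost; the return value is proved identical on all inputs.

-- ===== PORT A =====
-- state: (namespaces, bracket_level, current, i); strings handled as List Char, converted at the end
def splitNamespaceStep (symbol : String)
    (st : List (List Char) × Int × List Char × Int) (c : Char) :
    List (List Char) × Int × List Char × Int :=
  let (ns, lvl, cur, i) := st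
  if c = '<' then (ns, lvl + 1, cur ++ [c], i + 1)
  else if c = '>' then (ns, lvl - 1, cur ++ [c], i + 1)
  else if c = ':' ∧ PySem.Str.pyGet? symbol i = some ':' ∧ lvl = 0 then
    ((if cur ≠ [] then ns ++ [cur] else ns), lvl, [], i + 1)
  else (ns, lvl, cur ++ [c], i + 1)

def splitNamespace (symbol : String) : List String :=
  let st := symbol.toList.foldl (splitNamespaceStep symbol) ([], 0, [], 0)
  (st.1 ++ [st.2.2.1]).map String.mk

-- ===== PORT B =====
def splitNamespace_alt (symbol : String) : List String :=
  let cuts := ((PySem.List.enumerate symbol.toList 0).foldl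
      (fun (st : List Int × Int) p =>
        if p.2 = '<' then (st.1, st.2 + 1)
        else if p.2 = '>' then (st.1, st.2 - 1)
        else if p.2 = ':' ∧ st.2 = 0 then (st.1 ++ [p.1], st.2)
        else (st.1, st.2)) ([], 0)).1
  let sp := cuts.foldl
      (fun (st : List (List Char) × Int) pos =>
        (st.1 ++ [PySem.List.slice symbol.toList (some st.2) (some pos)], pos + 1))
      ([], 0)
  let segments := sp.1 ++ [PySem.List.slice symbol.toList (some sp.2) none]
  (((PySem.List.slice segments none (some (-1))).filter (· ≠ [])) ++
    PySem.List.slice segments (some (-1)) none).map String.mk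

-- ===== PRECONDITION & SPEC =====
def Spec_splitNamespace (symbol : String) (out : List String) : Prop := out = splitNamespace_alt symbol
instance (symbol : String) (out : List String) : Decidable (Spec_splitNamespace symbol out) := by unfold Spec_splitNamespace; infer_instance

-- ===== CLAIM (what is proved, stated in full; the proofs are below) =====
def Claim_equal_splitNamespace : Prop := ∀ (symbol : String), Dom_splitNamespace symbol → Spec_splitNamespace symbol (splitNamespace symbol)

-- ===== LEMMAS AND PROOFS =====

-- Reference recursion: A's splitting rule (drop empty segment at a cut, keep the final one).
def splitGo : List Char → Int → List Char → List (List Char)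
  | [], _, cur => [cur]
  | c :: rest, lvl, cur =>
    if c = '<' then splitGo rest (lvl + 1) (cur ++ [c])
    else if c = '>' then splitGo rest (lvl - 1) (cur ++ [c])
    else if c = ':' ∧ lvl = 0 then
      (if cur ≠ [] then [cur] else []) ++ splitGo rest lvl []
    else splitGo rest lvl (cur ++ [c])

-- Reference recursion: the raw segments (keep everything).
def splitRaw : List Char → Int → List Char → List (List Char)
  | [], _, cur => [cur]
  | c :: rest, lvl, cur =>
    if c = '<' then splitRaw rest (lvl + 1) (cur ++ [c])
    else if c = '>' then splitRaw rest (lvl - 1) (cur ++ [c])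
    else if c = ':' ∧ lvl = 0 then cur :: splitRaw rest lvl []
    else splitRaw rest lvl (cur ++ [c])

lemma splitRaw_ne_nil (l : List Char) (lvl : Int) (cur : List Char) :
    splitRaw l lvl cur ≠ [] := by
  induction l generalizing lvl cur with
  | nil => simp [splitRaw]
  | cons c rest ih =>
    simp only [splitRaw]
    split_ifs <;> simp [ih]

-- A's rule, expressed as a post-pass on the raw segments.
lemma splitGo_eq_raw (l : List Char) (lvl : Int) (cur : List Char) :
    splitGo l lvl cur =
      (splitRaw l lvl cur).dropLast.filter (· ≠ []) ++
        (splitRaw l lvl cur).drop ((splitRaw l lvl cur).length - 1) := by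
  induction l generalizing lvl cur with
  | nil => simp [splitGo, splitRaw]
  | cons c rest ih =>
    by_cases h1 : c = '<'
    · simp only [splitGo, splitRaw, if_pos h1]; exact ih _ _
    by_cases h2 : c = '>'
    · simp only [splitGo, splitRaw, if_neg h1, if_pos h2]; exact ih _ _
    by_cases h3 : c = ':' ∧ lvl = 0
    · simp only [splitGo, splitRaw, if_neg h1, if_neg h2, if_pos h3]
      obtain ⟨r, R, hR⟩ := List.exists_cons_of_ne_nil (splitRaw_ne_nil rest lvl [])
      rw [ih, hR]
      by_cases hc : cur = [] <;>
        simp [hc, List.dropLast_cons_of_ne_nil]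
    · simp only [splitGo, splitRaw, if_neg h1, if_neg h2, if_neg h3]; exact ih _ _

-- A's fold equals splitGo (invariant: i is the length of the consumed prefix).
lemma foldA (symbol : String) :
    ∀ (rest pre : List Char) (ns : List (List Char)) (lvl : Int) (cur : List Char),
    symbol.toList = pre ++ rest →
    (rest.foldl (splitNamespaceStep symbol) (ns, lvl, cur, (pre.length : Int))).1 ++
      [(rest.foldl (splitNamespaceStep symbol) (ns, lvl, cur, (pre.length : Int))).2.2.1]
    = ns ++ splitGo rest lvl cur := by
  intro rest
  induction rest with
  | nil => intro pre ns lvl cur _; simp [splitGo]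
  | cons c rest' ih =>
    intro pre ns lvl cur h
    have hget : PySem.Str.pyGet? symbol ((pre.length : Nat) : Int) = some c := by
      rw [PySem.Str.pyGet?_natCast, h, List.getElem?_append_right (le_refl _)]
      simp
    have hlen : ((pre.length : Int) + 1) = (((pre ++ [c]).length : Nat) : Int) := by
      simp only [List.length_append, List.length_cons, List.length_nil]; push_cast; omega
    have h' : symbol.toList = (pre ++ [c]) ++ rest' := by rw [h]; simp
    simp only [List.foldl_cons, splitNamespaceStep, splitGo]
    by_cases h1 : c = '<'
    · rw [if_pos h1, if_pos h1, hlen, ih (pre ++ [c]) ns _ _ h']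
    by_cases h2 : c = '>'
    · rw [if_neg h1, if_pos h2, if_neg h1, if_pos h2, hlen, ih (pre ++ [c]) ns _ _ h']
    by_cases h3 : c = ':' ∧ PySem.Str.pyGet? symbol (pre.length : Int) = some ':' ∧ lvl = 0
    · have hc : c = ':' ∧ lvl = 0 := ⟨h3.1, h3.2.2⟩
      rw [if_neg h1, if_neg h2, if_pos h3, if_neg h1, if_neg h2, if_pos hc]
      rw [hlen]
      by_cases hcur : cur = []
      · rw [if_neg (by simpa using hcur), ih (pre ++ [c]) ns lvl [] h']
        simp [hcur]
      · rw [if_pos hcur, ih (pre ++ [c]) (ns ++ [cur]) lvl [] h']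
        simp [hcur]
    · have hc : ¬ (c = ':' ∧ lvl = 0) := by
        intro hcc
        exact h3 ⟨hcc.1, by rw [← hcc.1]; exact hget, hcc.2⟩
      rw [if_neg h1, if_neg h2, if_neg h3, if_neg h1, if_neg h2, if_neg hc, hlen,
        ih (pre ++ [c]) ns _ _ h']

lemma partA (symbol : String) :
    splitNamespace symbol = (splitGo symbol.toList 0 []).map String.mk := by
  have := foldA symbol symbol.toList [] [] 0 [] (by simp)
  simp only [List.length_nil, Nat.cast_zero] at this
  simp [splitNamespace, this]

-- B's first pass, as a recursion.
def cutsF : List Char → Nat → Int → List Int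
  | [], _, _ => []
  | c :: rest, i, lvl =>
    if c = '<' then cutsF rest (i + 1) (lvl + 1)
    else if c = '>' then cutsF rest (i + 1) (lvl - 1)
    else if c = ':' ∧ lvl = 0 then ((i : Int)) :: cutsF rest (i + 1) lvl
    else cutsF rest (i + 1) lvl

lemma foldCuts :
    ∀ (rest : List Char) (n : Nat) (acc : List Int) (lvl : Int),
    ((PySem.List.enumerate rest ((n : Nat) : Int)).foldl
      (fun (st : List Int × Int) p =>
        if p.2 = '<' then (st.1, st.2 + 1)
        else if p.2 = '>' then (st.1, st.2 - 1)
        else if p.2 = ':' ∧ st.2 = 0 then (st.1 ++ [p.1], st.2)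
        else (st.1, st.2)) (acc, lvl)).1 = acc ++ cutsF rest n lvl := by
  intro rest
  induction rest with
  | nil => intro n acc lvl; simp [PySem.List.enumerate_nil, cutsF]
  | cons c rest' ih =>
    intro n acc lvl
    have hn : ((n : Nat) : Int) + 1 = (((n + 1 : Nat)) : Int) := by push_cast; ring
    rw [PySem.List.enumerate_cons, List.foldl_cons]
    simp only [cutsF]
    by_cases h1 : c = '<'
    · rw [if_pos h1, if_pos h1, hn]; exact ih (n + 1) acc (lvl + 1)
    by_cases h2 : c = '>'
    · rw [if_neg h1, if_pos h2, if_neg h1, if_pos h2, hn]; exact ih (n + 1) acc (lvl - 1)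
    by_cases h3 : c = ':' ∧ lvl = 0
    · rw [if_neg h1, if_neg h2, if_pos h3, if_neg h1, if_neg h2, if_pos h3, hn,
        ih (n + 1) (acc ++ [((n : Nat) : Int)]) lvl]
      simp
    · rw [if_neg h1, if_neg h2, if_neg h3, if_neg h1, if_neg h2, if_neg h3, hn]
      exact ih (n + 1) acc lvl

-- B's second pass, as a function of the cut list (proof helper only).
def segOf (L : List Char) (cuts : List Int) (acc : List (List Char)) (prev : Int) :
    List (List Char) :=
  let sp := cuts.foldl
      (fun (st : List (List Char) × Int) pos =>
        (st.1 ++ [PySem.List.slice L (some st.2) (some pos)], pos + 1)) (acc, prev)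
  sp.1 ++ [PySem.List.slice L (some sp.2) none]

lemma take_len_succ {α : Type} (d l : List α) (c : α) :
    (d ++ c :: l).take (d.length + 1) = (d ++ c :: l).take d.length ++ [c] := by
  rw [List.take_append, List.take_append, List.take_of_length_le (by omega), List.take_length]
  simp

lemma take_drop_snoc (pre rest : List Char) (c : Char) (prev : Nat) (h : prev ≤ pre.length) :
    ((pre ++ c :: rest).drop prev).take (pre.length + 1 - prev) =
      ((pre ++ c :: rest).drop prev).take (pre.length - prev) ++ [c] := by
  rw [List.drop_append_of_le_length h]
  have h1 : (pre.drop prev).length = pre.length - prev := List.length_drop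
  have hm : pre.length + 1 - prev = (pre.drop prev).length + 1 := by rw [h1]; omega
  rw [hm, ← h1, take_len_succ]

-- the slicing pass over the cuts of the remaining input rebuilds the raw segments
lemma segOf_eq_raw (L : List Char) :
    ∀ (rest pre : List Char) (lvl : Int) (prev : Nat) (acc : List (List Char)),
    L = pre ++ rest → prev ≤ pre.length →
    segOf L (cutsF rest pre.length lvl) acc ((prev : Nat) : Int) =
      acc ++ splitRaw rest lvl ((L.drop prev).take (pre.length - prev)) := by
  intro rest
  induction rest with
  | nil =>
    intro pre lvl prev acc h hp
    subst h
    rw [List.append_nil] at *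
    simp only [cutsF, segOf, List.foldl_nil, splitRaw]
    rw [PySem.List.slice_from_natCast, List.take_of_length_le (by simp [List.length_drop])]
  | cons c rest' ih =>
    intro pre lvl prev acc h hp
    have h' : L = (pre ++ [c]) ++ rest' := by rw [h]; simp
    have hlen : (pre ++ [c]).length = pre.length + 1 := by simp
    have hcur : (L.drop prev).take (pre.length + 1 - prev) =
        (L.drop prev).take (pre.length - prev) ++ [c] := by
      rw [h]; exact take_drop_snoc pre rest' c prev hp
    simp only [cutsF, splitRaw]
    split_ifs with h1 h2 h3
    · have := ih (pre ++ [c]) (lvl + 1) prev acc h' (by omega)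
      rw [hlen, hcur] at this; exact this
    · have := ih (pre ++ [c]) (lvl - 1) prev acc h' (by omega)
      rw [hlen, hcur] at this; exact this
    · -- cut: consume the head of the cut list, slice closes the current segment
      have hslice : PySem.List.slice L (some ((prev : Nat) : Int)) (some ((pre.length : Nat) : Int)) =
          (L.drop prev).take (pre.length - prev) := PySem.List.slice_natCast L prev pre.length
      have hstep : segOf L (((pre.length : Nat) : Int) :: cutsF rest' (pre.length + 1) lvl) acc
            ((prev : Nat) : Int) =
          segOf L (cutsF rest' (pre.length + 1) lvl)
            (acc ++ [(L.drop prev).take (pre.length - prev)]) (((pre.length : Nat) : Int) + 1) := by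
        simp [segOf, hslice]
      have hn : ((pre.length : Nat) : Int) + 1 = (((pre.length + 1 : Nat)) : Int) := by
        push_cast; omega
      have := ih (pre ++ [c]) lvl (pre.length + 1)
          (acc ++ [(L.drop prev).take (pre.length - prev)]) h' (by simp)
      rw [hlen] at this
      rw [hstep, hn, this]
      simp
    · have := ih (pre ++ [c]) lvl prev acc h' (by omega)
      rw [hlen, hcur] at this; exact this

lemma partB (symbol : String) :
    splitNamespace_alt symbol =
      ((splitRaw symbol.toList 0 []).dropLast.filter (· ≠ []) ++
        (splitRaw symbol.toList 0 []).drop ((splitRaw symbol.toList 0 []).length - 1)).map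
        String.mk := by
  have hcuts := foldCuts symbol.toList 0 [] 0
  simp only [Nat.cast_zero, List.nil_append] at hcuts
  have hseg := segOf_eq_raw symbol.toList symbol.toList [] 0 0 [] (by simp) (by simp)
  simp only [Nat.cast_zero, List.length_nil, List.nil_append, Nat.sub_zero, List.drop_zero,
    List.take_zero] at hseg
  unfold splitNamespace_alt
  rw [hcuts]
  unfold segOf at hseg
  simp only []
  rw [hseg, PySem.List.slice_to_neg_one, PySem.List.slice_from_neg_one]

-- ===== VERDICT (by name: the statement is the Claim_ definition above) =====
theorem splitNamespace_spec : Claim_equal_splitNamespace := by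
  intro symbol _
  unfold Spec_splitNamespace
  rw [partA, partB, splitGo_eq_raw]
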